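-- pv_equiv track=rewrite | github.com/uday171197/Practice_coding | practice_ds/recursion/subsequencewithsum.py | countSubSeq
-- ===== SOURCE A (Python) =====
-- def countSubSeq(arr,n,ind,s,res,sumvalue):
--     if ind >= n:
--         if sumvalue == s:
--             return 1
--         return 0
--
--     res.append(arr[ind])
--     sumvalue+=arr[ind]
--     l = countSubSeq(arr,n,ind+1,s,res,sumvalue)
--
--     res.pop()
--     sumvalue-=arr[ind]
--
--     r = countSubSeq(arr,n,ind+1,s,res,sumvalue)
--
--     return l+r
-- ===== SOURCE B (Python) =====
-- def countSubSeq(arr, n, ind, s, res, sumvalue):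
--     # DP over achievable sums: counts[v] = number of subsequences of arr[ind:n]
--     # (with python indexing) whose total plus the starting sumvalue equals v.
--     counts = {sumvalue: 1}
--     for i in range(ind, n):
--         x = arr[i]
--         new = {}
--         for v, c in counts.items():
--             new[v] = new.get(v, 0) + c
--             new[v + x] = new.get(v + x, 0) + c
--         counts = new
--     return counts.get(s, 0)
-- ===== Notes on version B (the rewrite author's own statement) =====
-- stated objective: faster
-- what changed: Replaced the exponential include/exclude recursion with an iterative dict-based DP that counts, for each achievable running sum, how many subsequences of arr[ind:n] reach it, then looks up s.
import Mathlib
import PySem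

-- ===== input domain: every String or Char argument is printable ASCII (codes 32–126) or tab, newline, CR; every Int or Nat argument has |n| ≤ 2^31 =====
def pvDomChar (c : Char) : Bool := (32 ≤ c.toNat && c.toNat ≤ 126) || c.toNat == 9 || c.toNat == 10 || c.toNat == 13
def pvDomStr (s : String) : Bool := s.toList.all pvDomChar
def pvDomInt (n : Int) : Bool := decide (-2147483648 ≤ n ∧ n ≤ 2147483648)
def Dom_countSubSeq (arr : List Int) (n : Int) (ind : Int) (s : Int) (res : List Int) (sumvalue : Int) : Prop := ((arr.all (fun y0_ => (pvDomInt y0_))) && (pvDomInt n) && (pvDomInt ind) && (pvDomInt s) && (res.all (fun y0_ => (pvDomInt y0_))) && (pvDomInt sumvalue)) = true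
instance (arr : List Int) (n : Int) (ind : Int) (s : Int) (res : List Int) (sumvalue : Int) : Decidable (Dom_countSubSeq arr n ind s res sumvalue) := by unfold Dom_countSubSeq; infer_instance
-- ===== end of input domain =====

-- B replaces A's O(2^(n-ind)) branch recursion by a dict-based subset-sum count DP; return values only
-- (A's append/pop on res is net-neutral and B leaves res untouched).

-- ===== PORT A =====
-- arr[ind] is ported as pyGetD with default 0, exact under Pre_countSubSeq (index in Python range).
def countSubSeq (arr : List Int) (n : Int) (ind : Int) (s : Int) (res : List Int) (sumvalue : Int) : Int :=
  if ind ≥ n then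
    if sumvalue = s then 1 else 0
  else
    let x := PySem.List.pyGetD arr ind 0
    let l := countSubSeq arr n (ind + 1) s (res ++ [x]) (sumvalue + x)
    let r := countSubSeq arr n (ind + 1) s res sumvalue
    l + r
termination_by (n - ind).toNat
decreasing_by all_goals omega

-- ===== PORT B =====
-- inner-loop body of Source B: new[v] = new.get(v,0)+c ; new[v+x] = new.get(v+x,0)+c
def pvInnerStep (x : Int) (new : PySem.Dict Int Int) (vc : Int × Int) : PySem.Dict Int Int :=
  let new := new.insert vc.1 (new.getD vc.1 0 + vc.2)
  new.insert (vc.1 + x) (new.getD (vc.1 + x) 0 + vc.2)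

def countSubSeq_alt (arr : List Int) (n : Int) (ind : Int) (s : Int) (res : List Int) (sumvalue : Int) : Int :=
  ((PySem.List.pyRange ind n 1).foldl
    (fun counts i =>
      counts.items.foldl (pvInnerStep (PySem.List.pyGetD arr i 0)) PySem.Dict.empty)
    (PySem.Dict.empty.insert sumvalue 1)).getD s 0

-- ===== PRECONDITION & SPEC =====
-- Pre_ excludes exactly the inputs where Python A raises IndexError: some index in [ind, n) is
-- outside Python's valid index range for arr.
def Pre_countSubSeq (arr : List Int) (n : Int) (ind : Int) (s : Int) (res : List Int) (sumvalue : Int) : Prop :=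
  ind < n → (-(arr.length : Int) ≤ ind ∧ n ≤ (arr.length : Int))
instance (arr : List Int) (n : Int) (ind : Int) (s : Int) (res : List Int) (sumvalue : Int) : Decidable (Pre_countSubSeq arr n ind s res sumvalue) := by unfold Pre_countSubSeq; infer_instance

def pvWitness_countSubSeq : List Int × Int × Int × Int × List Int × Int := ([1, 2, 1], 3, 0, 3, [], 0)

def Spec_countSubSeq (arr : List Int) (n : Int) (ind : Int) (s : Int) (res : List Int) (sumvalue : Int) (out : Int) : Prop := out = countSubSeq_alt arr n ind s res sumvalue
instance (arr : List Int) (n : Int) (ind : Int) (s : Int) (res : List Int) (sumvalue : Int) (out : Int) : Decidable (Spec_countSubSeq arr n ind s res sumvalue out) := by unfold Spec_countSubSeq; infer_instance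

-- ===== CLAIM (what is proved, stated in full; the proofs are below) =====
def Claim_equal_countSubSeq : Prop := ∀ (arr : List Int) (n : Int) (ind : Int) (s : Int) (res : List Int) (sumvalue : Int), Dom_countSubSeq arr n ind s res sumvalue → Pre_countSubSeq arr n ind s res sumvalue → Spec_countSubSeq arr n ind s res sumvalue (countSubSeq arr n ind s res sumvalue)

-- ===== LEMMAS AND PROOFS =====

-- reference count: number of subsequences of xs whose sum plus sv equals s
def pvCnt (xs : List Int) (sv : Int) (s : Int) : Int :=
  match xs with
  | [] => if sv = s then 1 else 0
  | x :: rest => pvCnt rest (sv + x) s + pvCnt rest sv s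

-- linear transform computed by B's outer loop
def pvF (xs : List Int) (h : Int → Int) (t : Int) : Int :=
  match xs with
  | [] => h t
  | x :: rest => pvF rest (fun u => h u + h (u - x)) t

lemma pvF_congr (xs : List Int) (h h' : Int → Int) (hh : ∀ u, h u = h' u) (t : Int) :
    pvF xs h t = pvF xs h' t := by
  induction xs generalizing h h' with
  | nil => simpa [pvF] using hh t
  | cons x rest ih => exact ih _ _ (fun u => by simp [hh])

lemma pvF_add (xs : List Int) (h1 h2 : Int → Int) (t : Int) :
    pvF xs (fun u => h1 u + h2 u) t = pvF xs h1 t + pvF xs h2 t := by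
  induction xs generalizing h1 h2 with
  | nil => simp [pvF]
  | cons x rest ih =>
      simp only [pvF]
      rw [pvF_congr rest _ (fun u => (h1 u + h1 (u - x)) + (h2 u + h2 (u - x))) (by intro u; ring)]
      exact ih _ _

lemma pvCnt_eq_pvF (xs : List Int) (sv s : Int) :
    pvCnt xs sv s = pvF xs (fun u => if u = sv then 1 else 0) s := by
  induction xs generalizing sv with
  | nil => simp only [pvCnt, pvF]; split_ifs with h1 h2 h2 <;> omega
  | cons x rest ih =>
      simp only [pvCnt, pvF]
      rw [ih (sv + x), ih sv, ← pvF_add]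
      refine pvF_congr rest _ _ (fun u => ?_) s
      simp only [show (u - x = sv) ↔ (u = sv + x) from by omega]
      exact add_comm _ _

-- A's recursion computes pvCnt of the element list
lemma countSubSeq_eq_pvCnt (arr : List Int) (n ind s : Int) (res : List Int) (sv : Int) :
    countSubSeq arr n ind s res sv
      = pvCnt ((PySem.List.pyRange ind n 1).map (fun i => PySem.List.pyGetD arr i 0)) sv s := by
  by_cases h : ind ≥ n
  · rw [countSubSeq, PySem.List.pyRange_one_eq_nil h]
    simp [h, pvCnt]
  · rw [countSubSeq, PySem.List.pyRange_one_cons (by omega)]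
    simp only [h, if_false, List.map_cons, pvCnt]
    rw [countSubSeq_eq_pvCnt arr n (ind + 1) s, countSubSeq_eq_pvCnt arr n (ind + 1) s]
termination_by (n - ind).toNat
decreasing_by all_goals omega

-- one pvInnerStep adds vc.2 at keys vc.1 and vc.1 + x
lemma pvInnerStep_getD (x : Int) (d : PySem.Dict Int Int) (vc : Int × Int) (t : Int) :
    (pvInnerStep x d vc).getD t 0
      = d.getD t 0 + ((if vc.1 = t then vc.2 else 0) + (if vc.1 + x = t then vc.2 else 0)) := by
  simp only [pvInnerStep, PySem.Dict.getD_insert]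
  by_cases h1 : t = vc.1 + x
  · by_cases h0 : x = 0
    · subst h0; subst h1; simp; try omega
    · subst h1
      have hne : ¬(vc.1 + x = vc.1) := by omega
      have hne' : ¬(vc.1 = vc.1 + x) := by omega
      simp [hne, hne']; try omega
  · by_cases h2 : t = vc.1
    · subst h2
      simp [h1]; try omega
    · have h1' : ¬(vc.1 + x = t) := fun h => h1 h.symm
      have h2' : ¬(vc.1 = t) := fun h => h2 h.symm
      simp [h1, h2, h1', h2']; try omega

lemma pvInnerFold_getD (x : Int) (P : List (Int × Int)) (d : PySem.Dict Int Int) (t : Int) :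
    (P.foldl (pvInnerStep x) d).getD t 0
      = d.getD t 0
        + (P.map (fun vc => (if vc.1 = t then vc.2 else 0) + (if vc.1 + x = t then vc.2 else 0))).sum := by
  induction P generalizing d with
  | nil => simp
  | cons vc rest ih =>
      simp only [List.foldl_cons, List.map_cons, List.sum_cons]
      rw [ih, pvInnerStep_getD]
      ring

lemma pvInnerFold_nodup (x : Int) (P : List (Int × Int)) (d : PySem.Dict Int Int)
    (hd : d.keys.Nodup) : ((P.foldl (pvInnerStep x) d).keys).Nodup := by
  induction P generalizing d with
  | nil => exact hd
  | cons vc rest ih =>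
      exact ih _ (PySem.Dict.nodup_keys_insert _ _ _ (PySem.Dict.nodup_keys_insert _ _ _ hd))

-- on a dict with nodup keys, summing an if-indicator over items is a lookup
lemma pvSumIf_getD (l : List (Int × Int)) (hn : (l.map (·.1)).Nodup) (t : Int) :
    (l.map (fun vc => if vc.1 = t then vc.2 else 0)).sum = (PySem.Dict.mk l).getD t 0 := by
  induction l with
  | nil => simp [PySem.Dict.getD, PySem.Dict.get?]
  | cons p rest ih =>
      obtain ⟨k, c⟩ := p
      simp only [List.map_cons, List.sum_cons, List.nodup_cons] at hn ⊢
      rw [ih hn.2]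
      conv_rhs => rw [PySem.Dict.getD_eq_get?_getD, PySem.Dict.get?_mk_cons]
      by_cases h : k = t
      · subst h
        have hz : (PySem.Dict.mk rest).getD k 0 = 0 := by
          rw [PySem.Dict.getD_eq_get?_getD,
              (PySem.Dict.get?_eq_none_iff_not_mem_keys _ _).2 (by simpa using hn.1)]
          rfl
        simp [hz]
      · simp [h, PySem.Dict.getD_eq_get?_getD]

lemma pvStep_getD (x : Int) (d : PySem.Dict Int Int) (hd : d.keys.Nodup) (t : Int) :
    (d.items.foldl (pvInnerStep x) PySem.Dict.empty).getD t 0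
      = d.getD t 0 + d.getD (t - x) 0 := by
  rw [pvInnerFold_getD]
  have hmk : PySem.Dict.mk d.items = d := by cases d; rfl
  have hkeys : (d.items.map (·.1)).Nodup := hd
  have h1 := pvSumIf_getD d.items hkeys t
  have h2 := pvSumIf_getD d.items hkeys (t - x)
  rw [hmk] at h1 h2
  calc (PySem.Dict.empty.getD t 0)
        + (d.items.map (fun vc => (if vc.1 = t then vc.2 else 0) + (if vc.1 + x = t then vc.2 else 0))).sum
      = (d.items.map (fun vc => if vc.1 = t then vc.2 else 0)).sum
        + (d.items.map (fun vc => if vc.1 = t - x then vc.2 else 0)).sum := by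
        rw [← List.sum_map_add]
        simp only [PySem.Dict.getD_empty, zero_add]
        congr 1
        apply List.map_congr_left
        intro vc _
        simp only [show (vc.1 + x = t) ↔ (vc.1 = t - x) from by omega]
    _ = d.getD t 0 + d.getD (t - x) 0 := by rw [h1, h2]

lemma pvOuter_getD (xs : List Int) (d : PySem.Dict Int Int) (hd : d.keys.Nodup) (t : Int) :
    (xs.foldl (fun c x => c.items.foldl (pvInnerStep x) PySem.Dict.empty) d).getD t 0
      = pvF xs (fun u => d.getD u 0) t := by
  induction xs generalizing d with
  | nil => simp [pvF]
  | cons x rest ih =>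
      simp only [List.foldl_cons, pvF]
      rw [ih _ (pvInnerFold_nodup x d.items PySem.Dict.empty PySem.Dict.nodup_keys_empty)]
      exact pvF_congr rest _ _ (fun u => pvStep_getD x d hd u) t

lemma countSubSeq_alt_eq_pvCnt (arr : List Int) (n ind s : Int) (res : List Int) (sv : Int) :
    countSubSeq_alt arr n ind s res sv
      = pvCnt ((PySem.List.pyRange ind n 1).map (fun i => PySem.List.pyGetD arr i 0)) sv s := by
  unfold countSubSeq_alt
  have hfold :
      ((PySem.List.pyRange ind n 1).map (fun i => PySem.List.pyGetD arr i 0)).foldl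
          (fun c x => c.items.foldl (pvInnerStep x) PySem.Dict.empty)
          (PySem.Dict.empty.insert sv 1)
        = (PySem.List.pyRange ind n 1).foldl
            (fun counts i =>
              counts.items.foldl (pvInnerStep (PySem.List.pyGetD arr i 0)) PySem.Dict.empty)
            (PySem.Dict.empty.insert sv 1) :=
    List.foldl_map
  rw [← hfold]
  rw [pvOuter_getD _ _ (PySem.Dict.nodup_keys_insert _ _ _ PySem.Dict.nodup_keys_empty)]
  rw [pvCnt_eq_pvF]
  refine pvF_congr _ _ _ (fun u => ?_) s
  rw [PySem.Dict.getD_insert]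
  simp [PySem.Dict.getD_empty]

-- ===== VERDICT (by name: the statement is the Claim_ definition above) =====
theorem countSubSeq_spec : Claim_equal_countSubSeq := by
  intro arr n ind s res sumvalue _ _
  unfold Spec_countSubSeq
  rw [countSubSeq_eq_pvCnt, countSubSeq_alt_eq_pvCnt]
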